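-- pv_equiv track=rewrite | github.com/LN-08/Programacion-I-UTN | Entregas_Guias_Div213/Practica_8_Arrays/ejer5.py | buscar_persona_de_menor_edad
-- ===== SOURCE A (Python) =====
-- nombres = ["Ana","Luis","Juan","Sol","Roberto","Sonia","Ulises","Sofia","Maria","Pedro","Antonio", "Eugenia", "Soledad", "Mario", "Mariela"]
--
-- def buscar_persona_de_menor_edad(lista_de_edades)->list:
--
--     datos_del_o_los_menores = []
--
--     # buscar la edad mas chica de la lista dada por parametro
--     menor_por_ahora = lista_de_edades[0]
--     for i in range(len(lista_de_edades)):
--         if lista_de_edades[i] < menor_por_ahora: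
--             menor_por_ahora = lista_de_edades[i]
--
--
--     # buscar los nombres con la edad mas chica encontrada
--     for i in range(len(lista_de_edades)):
--
--         if lista_de_edades[i] == menor_por_ahora:
--             datos_del_o_los_menores.append((nombres[i], lista_de_edades[i]))
--
--
--     return datos_del_o_los_menores
-- ===== SOURCE B (Python) =====
-- nombres = ["Ana","Luis","Juan","Sol","Roberto","Sonia","Ulises","Sofia","Maria","Pedro","Antonio", "Eugenia", "Soledad", "Mario", "Mariela"]
--
-- def buscar_persona_de_menor_edad(lista_de_edades)->list:
--     # single pass: track running minimum, reset the result on a new minimum, append on a tie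
--     menor = lista_de_edades[0]
--     resultado = [(nombres[0], menor)]
--     for i in range(1, len(lista_de_edades)):
--         edad = lista_de_edades[i]
--         if edad < menor:
--             menor = edad
--             resultado = [(nombres[i], edad)]
--         elif edad == menor:
--             resultado.append((nombres[i], edad))
--     return resultado
-- ===== Notes on version B (the rewrite author's own statement) =====
-- stated objective: alternative
-- what changed: A makes two full passes (first find the minimum age, then rescan to collect matching (name, age) pairs); B is a single pass that keeps a running minimum and resets the collected pairs whenever a strictly smaller age appears, appending on ties.
import Mathlib
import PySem

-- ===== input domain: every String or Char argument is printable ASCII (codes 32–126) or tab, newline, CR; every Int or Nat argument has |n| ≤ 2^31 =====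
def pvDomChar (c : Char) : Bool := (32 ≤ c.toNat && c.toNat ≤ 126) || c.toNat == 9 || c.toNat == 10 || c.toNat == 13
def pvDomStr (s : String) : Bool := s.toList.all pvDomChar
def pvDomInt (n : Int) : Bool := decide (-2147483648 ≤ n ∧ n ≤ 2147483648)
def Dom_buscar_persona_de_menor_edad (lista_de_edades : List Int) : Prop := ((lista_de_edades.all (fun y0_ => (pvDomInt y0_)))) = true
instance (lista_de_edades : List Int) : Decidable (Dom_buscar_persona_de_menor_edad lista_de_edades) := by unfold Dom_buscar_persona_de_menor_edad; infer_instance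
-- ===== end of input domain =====

-- B fuses A's two passes into one accumulator pass (running minimum, reset on strictly smaller, append on tie);
-- equivalence of the return values is proved for every non-empty list whose minimum lies within the names table.

-- ===== PORT A =====
def nombres : List String := ["Ana","Luis","Juan","Sol","Roberto","Sonia","Ulises","Sofia","Maria","Pedro","Antonio", "Eugenia", "Soledad", "Mario", "Mariela"]

-- nombres[i]; the none (IndexError) case is excluded by Pre_, the default is never reached there
def pvNombre (i : Nat) : String := (PySem.List.pyGet? nombres (i : Int)).getD ""

-- first loop of A: running minimum over the whole list
def pvAMin : List Int → Int → Int
  | [], m => m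
  | e :: t, m => pvAMin t (if e < m then e else m)

-- second loop of A: collect (nombres[i], edad) for every index with the minimal age
def pvALoop (menor : Int) : List Int → Nat → List (String × Int) → List (String × Int)
  | [], _, acc => acc
  | e :: t, i, acc =>
      if e == menor then pvALoop menor t (i + 1) (acc ++ [(pvNombre i, e)])
      else pvALoop menor t (i + 1) acc

def buscar_persona_de_menor_edad (lista_de_edades : List Int) : List (String × Int) :=
  match PySem.List.pyGet? lista_de_edades 0 with
  | none => []   -- lista_de_edades[0]: IndexError on empty input, excluded by Pre_
  | some m0 => pvALoop (pvAMin lista_de_edades m0) lista_de_edades 0 []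

-- ===== PORT B =====
-- single pass: reset the result on a strictly smaller age, append on a tie
def pvBAux : List Int → Nat → Int → List (String × Int) → List (String × Int)
  | [], _, _, res => res
  | e :: t, i, menor, res =>
      if e < menor then pvBAux t (i + 1) e [(pvNombre i, e)]
      else if e == menor then pvBAux t (i + 1) menor (res ++ [(pvNombre i, e)])
      else pvBAux t (i + 1) menor res

def buscar_persona_de_menor_edad_alt (lista_de_edades : List Int) : List (String × Int) :=
  match lista_de_edades with
  | [] => []   -- lista_de_edades[0]: IndexError on empty input, excluded by Pre_
  | e0 :: rest => pvBAux rest 1 e0 [(pvNombre 0, e0)]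

-- ===== PRECONDITION & SPEC =====
-- Pre_ excludes exactly the inputs where the Python raises IndexError: the empty list
-- (lista_de_edades[0]) and lists whose minimal age occurs at an index ≥ 15 = len(nombres)
-- (equivalently: some element past position 15 is ≤ everything in the first 15, so nombres[i]
-- is read out of range); both A and B raise on exactly these inputs.
def Pre_buscar_persona_de_menor_edad (lista_de_edades : List Int) : Prop :=
  lista_de_edades ≠ [] ∧
  ∀ x ∈ lista_de_edades.drop 15, ∃ y ∈ lista_de_edades.take 15, y < x
instance (lista_de_edades : List Int) : Decidable (Pre_buscar_persona_de_menor_edad lista_de_edades) := by unfold Pre_buscar_persona_de_menor_edad; infer_instance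

def pvWitness_buscar_persona_de_menor_edad : List Int := [30, 18, 25, 18]

def Spec_buscar_persona_de_menor_edad (lista_de_edades : List Int) (out : List (String × Int)) : Prop := out = buscar_persona_de_menor_edad_alt lista_de_edades
instance (lista_de_edades : List Int) (out : List (String × Int)) : Decidable (Spec_buscar_persona_de_menor_edad lista_de_edades out) := by unfold Spec_buscar_persona_de_menor_edad; infer_instance

-- ===== CLAIM (what is proved, stated in full; the proofs are below) =====
def Claim_equal_buscar_persona_de_menor_edad : Prop := ∀ (lista_de_edades : List Int), Dom_buscar_persona_de_menor_edad lista_de_edades → Pre_buscar_persona_de_menor_edad lista_de_edades → Spec_buscar_persona_de_menor_edad lista_de_edades (buscar_persona_de_menor_edad lista_de_edades)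

-- ===== LEMMAS AND PROOFS =====

-- the common "selection" form both loops reduce to
def pvSel (m : Int) : List Int → Nat → List (String × Int)
  | [], _ => []
  | e :: t, i => if e == m then (pvNombre i, e) :: pvSel m t (i + 1) else pvSel m t (i + 1)

theorem pvALoop_eq_sel (m : Int) (t : List Int) (i : Nat) (acc : List (String × Int)) :
    pvALoop m t i acc = acc ++ pvSel m t i := by
  induction t generalizing i acc with
  | nil => simp [pvALoop, pvSel]
  | cons e t ih =>
      simp only [pvALoop, pvSel]
      by_cases h : e == m <;> simp [h, ih, List.append_assoc]

theorem pvAMin_le (t : List Int) (m : Int) : pvAMin t m ≤ m := by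
  induction t generalizing m with
  | nil => simp [pvAMin]
  | cons e t ih =>
      simp only [pvAMin]
      split_ifs with h
      · exact le_of_lt (lt_of_le_of_lt (ih e) h)
      · exact ih m

theorem pvBAux_eq_sel (t : List Int) (i : Nat) (menor : Int) (res : List (String × Int)) :
    pvBAux t i menor res =
      if pvAMin t menor < menor then pvSel (pvAMin t menor) t i
      else res ++ pvSel menor t i := by
  induction t generalizing i menor res with
  | nil => simp [pvBAux, pvSel, pvAMin]
  | cons e t ih =>
      by_cases h1 : e < menor
      · rw [show pvBAux (e :: t) i menor res = pvBAux t (i + 1) e [(pvNombre i, e)] from by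
          simp [pvBAux, h1]]
        rw [ih]
        have hAe : pvAMin (e :: t) menor = pvAMin t e := by simp [pvAMin, h1]
        by_cases h2 : pvAMin t e < e
        · have hlt : pvAMin t e < menor := lt_trans h2 h1
          have hne : (e == pvAMin t e) = false := by simp; omega
          rw [if_pos h2, hAe, if_pos hlt]
          simp [pvSel, hne]
        · have heq : pvAMin t e = e := le_antisymm (pvAMin_le t e) (not_lt.mp h2)
          have hlt : pvAMin (e :: t) menor < menor := by rw [hAe, heq]; exact h1
          rw [if_neg h2, if_pos hlt, hAe, heq]
          simp [pvSel]
      · by_cases h2 : e = menor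
        · subst h2
          rw [show pvBAux (e :: t) i e res = pvBAux t (i + 1) e (res ++ [(pvNombre i, e)]) from by
            simp [pvBAux]]
          rw [ih]
          have hAe : pvAMin (e :: t) e = pvAMin t e := by simp [pvAMin]
          rw [hAe]
          by_cases h3 : pvAMin t e < e
          · have hne : (e == pvAMin t e) = false := by simp; omega
            rw [if_pos h3, if_pos h3]
            simp [pvSel, hne]
          · rw [if_neg h3, if_neg h3]
            simp [pvSel, List.append_assoc]
        · have hgt : menor < e := lt_of_le_of_ne (not_lt.mp h1) (Ne.symm h2)
          rw [show pvBAux (e :: t) i menor res = pvBAux t (i + 1) menor res from by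
            simp [pvBAux, h1, h2]]
          rw [ih]
          have hAe : pvAMin (e :: t) menor = pvAMin t menor := by simp [pvAMin, h1]
          rw [hAe]
          have hle := pvAMin_le t menor
          split_ifs with h3
          · have hne : (e == pvAMin t menor) = false := by simp; omega
            simp [pvSel, hne]
          · simp [pvSel, h2]

-- ===== VERDICT (by name: the statement is the Claim_ definition above) =====
theorem buscar_persona_de_menor_edad_spec : Claim_equal_buscar_persona_de_menor_edad := by
  intro l _ hpre
  unfold Spec_buscar_persona_de_menor_edad
  obtain ⟨hne, -⟩ := hpre
  obtain ⟨e0, rest, rfl⟩ := List.exists_cons_of_ne_nil hne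
  unfold buscar_persona_de_menor_edad buscar_persona_de_menor_edad_alt
  rw [PySem.List.pyGet?_zero_cons]
  show pvALoop (pvAMin (e0 :: rest) e0) (e0 :: rest) 0 [] = pvBAux rest 1 e0 [(pvNombre 0, e0)]
  have hAe : pvAMin (e0 :: rest) e0 = pvAMin rest e0 := by simp [pvAMin]
  rw [pvALoop_eq_sel, pvBAux_eq_sel, List.nil_append, hAe]
  have hle := pvAMin_le rest e0
  by_cases h : pvAMin rest e0 < e0
  · have hne0 : (e0 == pvAMin rest e0) = false := by simp; omega
    rw [if_pos h]
    simp [pvSel, hne0]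
  · have heq : pvAMin rest e0 = e0 := le_antisymm hle (not_lt.mp h)
    rw [if_neg h, heq]
    simp [pvSel]
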